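-- pv_equiv track=rewrite | github.com/MrBrantCode/unitest_baseline | mut_generate/mist_train_cf/cf_91225/solution.py | categorize_strings
-- ===== SOURCE A (Python) =====
-- def categorize_strings(strings):
--     categorized_strings = {"short": [], "medium": [], "long": []}
--
--     for string in strings:
--         length = len(string)
--
--         if length < 5:
--             category = "short"
--         elif length <= 10:
--             category = "medium"
--         else:
--             category = "long"
--
--         categorized_strings[category].append(string)
--
--     return categorized_strings
-- ===== SOURCE B (Python) =====
-- def categorize_strings(strings):
--     return {
--         "short": [s for s in strings if len(s) < 5],
--         "medium": [s for s in strings if 5 <= len(s) <= 10],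
--         "long": [s for s in strings if len(s) > 10],
--     }
-- ===== Notes on version B (the rewrite author's own statement) =====
-- stated objective: simpler
-- what changed: Replaces the single dispatch loop that appends into mutable dict buckets by a dict literal built from three independent filtering passes, one per length bucket.
import Mathlib
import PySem

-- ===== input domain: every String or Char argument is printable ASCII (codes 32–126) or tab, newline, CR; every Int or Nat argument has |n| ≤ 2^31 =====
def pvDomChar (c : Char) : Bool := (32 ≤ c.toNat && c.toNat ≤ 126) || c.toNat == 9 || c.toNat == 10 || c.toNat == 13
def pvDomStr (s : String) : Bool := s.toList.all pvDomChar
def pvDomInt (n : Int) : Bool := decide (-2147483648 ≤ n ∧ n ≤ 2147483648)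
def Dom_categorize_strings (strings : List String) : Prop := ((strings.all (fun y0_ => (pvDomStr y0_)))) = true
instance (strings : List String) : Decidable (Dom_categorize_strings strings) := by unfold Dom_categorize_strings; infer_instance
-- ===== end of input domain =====

-- B builds the dict from three independent filtering passes instead of one dispatch loop (objective: simpler).
-- ===== PORT A =====
def categorize_strings (strings : List String) : List (String × List String) :=
  let d0 : PySem.Dict String (List String) :=
    ((PySem.Dict.empty.insert "short" []).insert "medium" []).insert "long" []
  (strings.foldl (fun d s =>
      let length : Int := PySem.Str.len s
      let category := if length < 5 then "short" else if length ≤ 10 then "medium" else "long"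
      d.modify category [] (· ++ [s])) d0).items

-- ===== PORT B =====
def categorize_strings_alt (strings : List String) : List (String × List String) :=
  [("short",  strings.filter (fun s => PySem.Str.len s < 5)),
   ("medium", strings.filter (fun s => 5 ≤ PySem.Str.len s && PySem.Str.len s ≤ 10)),
   ("long",   strings.filter (fun s => PySem.Str.len s > 10))]

-- ===== PRECONDITION & SPEC =====
def Spec_categorize_strings (strings : List String) (out : List (String × List String)) : Prop := out = categorize_strings_alt strings
instance (strings : List String) (out : List (String × List String)) : Decidable (Spec_categorize_strings strings out) := by unfold Spec_categorize_strings; infer_instance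

-- ===== CLAIM (what is proved, stated in full; the proofs are below) =====
def Claim_equal_categorize_strings : Prop := ∀ (strings : List String), Dom_categorize_strings strings → Spec_categorize_strings strings (categorize_strings strings)

-- ===== LEMMAS AND PROOFS =====
-- Appending into one bucket of the three-bucket dict literal.
theorem modify_short (a b c : List String) (s : String) :
    (PySem.Dict.mk [("short", a), ("medium", b), ("long", c)]).modify "short" [] (· ++ [s])
      = PySem.Dict.mk [("short", a ++ [s]), ("medium", b), ("long", c)] := by
  simp [PySem.Dict.modify, PySem.Dict.contains, PySem.Dict.insert, PySem.Dict.getD, PySem.Dict.get?]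

theorem modify_medium (a b c : List String) (s : String) :
    (PySem.Dict.mk [("short", a), ("medium", b), ("long", c)]).modify "medium" [] (· ++ [s])
      = PySem.Dict.mk [("short", a), ("medium", b ++ [s]), ("long", c)] := by
  simp [PySem.Dict.modify, PySem.Dict.contains, PySem.Dict.insert, PySem.Dict.getD, PySem.Dict.get?]

theorem modify_long (a b c : List String) (s : String) :
    (PySem.Dict.mk [("short", a), ("medium", b), ("long", c)]).modify "long" [] (· ++ [s])
      = PySem.Dict.mk [("short", a), ("medium", b), ("long", c ++ [s])] := by
  simp [PySem.Dict.modify, PySem.Dict.contains, PySem.Dict.insert, PySem.Dict.getD, PySem.Dict.get?]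

-- Loop invariant: the foldl over the three-bucket dict appends each string to the bucket
-- selected by its length, which equals appending the three filters.
theorem categorize_loop (strings : List String) (a b c : List String) :
    (strings.foldl (fun d s =>
      let length : Int := PySem.Str.len s
      let category := if length < 5 then "short" else if length ≤ 10 then "medium" else "long"
      d.modify category [] (· ++ [s]))
      (PySem.Dict.mk [("short", a), ("medium", b), ("long", c)]))
    = PySem.Dict.mk
        [("short",  a ++ strings.filter (fun s => PySem.Str.len s < 5)),
         ("medium", b ++ strings.filter (fun s => 5 ≤ PySem.Str.len s && PySem.Str.len s ≤ 10)),
         ("long",   c ++ strings.filter (fun s => PySem.Str.len s > 10))] := by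
  induction strings generalizing a b c with
  | nil => simp [List.filter]
  | cons hd tl ih =>
    simp only [List.foldl_cons, List.filter_cons]
    by_cases h1 : PySem.Str.len hd < 5
    · have e1 : decide (PySem.Str.len hd < 5) = true := decide_eq_true h1
      have e2 : decide (5 ≤ PySem.Str.len hd) = false := decide_eq_false (by omega)
      have e3 : decide (PySem.Str.len hd > 10) = false := decide_eq_false (by omega)
      rw [if_pos h1, modify_short a b c hd, ih]
      simp only [e1, e2, e3, Bool.false_and, if_true, if_false, Bool.false_eq_true, List.append_assoc,
        List.singleton_append]
    · by_cases h2 : PySem.Str.len hd ≤ 10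
      · have e1 : decide (PySem.Str.len hd < 5) = false := decide_eq_false h1
        have e2a : decide (5 ≤ PySem.Str.len hd) = true := decide_eq_true (by omega)
        have e2b : decide (PySem.Str.len hd ≤ 10) = true := decide_eq_true h2
        have e3 : decide (PySem.Str.len hd > 10) = false := decide_eq_false (by omega)
        rw [if_neg h1, if_pos h2, modify_medium a b c hd, ih]
        simp only [e1, e2a, e2b, e3, Bool.true_and, if_true, if_false, Bool.false_eq_true, List.append_assoc,
          List.singleton_append]
      · have e1 : decide (PySem.Str.len hd < 5) = false := decide_eq_false h1
        have e2 : decide (PySem.Str.len hd ≤ 10) = false := decide_eq_false h2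
        have e3 : decide (PySem.Str.len hd > 10) = true := decide_eq_true (by omega)
        rw [if_neg h1, if_neg h2, modify_long a b c hd, ih]
        simp only [e1, e2, e3, Bool.and_false, if_true, if_false, Bool.false_eq_true, List.append_assoc,
          List.singleton_append]

-- ===== VERDICT (by name: the statement is the Claim_ definition above) =====
theorem categorize_strings_spec : Claim_equal_categorize_strings := by
  intro strings _
  unfold Spec_categorize_strings categorize_strings
  have hd0 : (((PySem.Dict.empty.insert "short" []).insert "medium" []).insert "long" []
      : PySem.Dict String (List String))
      = PySem.Dict.mk [("short", []), ("medium", []), ("long", [])] := by rfl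
  simp only [hd0, categorize_loop strings [] [] [], categorize_strings_alt]
  rfl
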